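-- pv_equiv track=rewrite | github.com/benquick123/code-profiling | code/batch-2/vse-naloge-brez-testov/DN7-M-078.py | preberi_pot
-- ===== SOURCE A (Python) =====
-- def preberi_pot(ukazi):
--     """
--     Za podani seznam ukazov (glej navodila naloge) vrni pot.
--
--     Args:
--         ukazi (str): ukazi, napisani po vrsticah
--
--     Returns:
--         list of tuple of int: pot
--     """
--     tab = []
--     x = y = 0
--     tab.append((x, y))
--     smer = 0 #0: gor, 1: desno, 2: dol, 3: levo -> smer = smer % 4
--     for ukaz in ukazi.split("\n"):
--         smer %= 4
--         if ukaz == "DESNO":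
--             smer += 1
--         elif ukaz == "LEVO":
--             smer -= 1
--         else:
--             if smer == 0:
--                 y -= int(ukaz)
--             elif smer == 1:
--                 x += int(ukaz)
--             elif smer == 2:
--                 y += int(ukaz)
--             else:
--                 x -= int(ukaz)
--             tab.append((x, y))
--     return tab
-- ===== SOURCE B (Python) =====
-- DIRS = [(0, -1), (1, 0), (0, 1), (-1, 0)]
--
-- def preberi_pot(ukazi):
--     # Stage 1: resolve each move line into an absolute displacement vector,
--     # using a direction lookup table instead of a 4-way dispatch.
--     deltas = []
--     h = 0
--     for vrstica in ukazi.split("\n"):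
--         if vrstica == "DESNO":
--             h += 1
--         elif vrstica == "LEVO":
--             h -= 1
--         else:
--             dx, dy = DIRS[h % 4]
--             n = int(vrstica)
--             deltas.append((dx * n, dy * n))
--     # Stage 2: the path is the running prefix sum of the displacements.
--     pot = [(0, 0)]
--     for dx, dy in deltas:
--         x, y = pot[-1]
--         pot.append((x + dx, y + dy))
--     return pot
-- ===== Notes on version B (the rewrite author's own statement) =====
-- stated objective: alternative
-- what changed: B splits the work into two staged passes: a first pass resolves the commands into a list of absolute displacement vectors via a direction lookup table (no 4-way if/elif dispatch, no coordinate state), and a second pass builds the path as the running prefix sum of those displacements.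
import Mathlib
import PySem

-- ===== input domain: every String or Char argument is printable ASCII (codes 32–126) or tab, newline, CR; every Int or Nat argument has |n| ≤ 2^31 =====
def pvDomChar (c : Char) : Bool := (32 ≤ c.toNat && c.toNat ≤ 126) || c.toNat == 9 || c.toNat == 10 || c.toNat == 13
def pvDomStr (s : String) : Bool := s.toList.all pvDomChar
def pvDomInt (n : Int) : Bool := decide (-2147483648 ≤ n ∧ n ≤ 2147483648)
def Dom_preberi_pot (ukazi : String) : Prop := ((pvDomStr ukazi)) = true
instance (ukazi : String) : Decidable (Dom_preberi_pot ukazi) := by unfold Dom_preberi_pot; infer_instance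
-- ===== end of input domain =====

-- B replaces A's stateful one-pass simulation by two staged passes: resolve commands into
-- displacement vectors via a lookup table, then prefix-sum them into the path (alternative; same cost).

-- ===== PORT A =====
-- state: (tab, x, y, smer)
def stepA (st : List (Int × Int) × Int × Int × Int) (ukaz : String) : List (Int × Int) × Int × Int × Int :=
  let (tab, x, y, smer) := st
  let smer := PySem.Int.mod smer 4
  if ukaz = "DESNO" then (tab, x, y, smer + 1)
  else if ukaz = "LEVO" then (tab, x, y, smer - 1)
  else
    let n := (PySem.Int.ofStr? ukaz).getD 0   -- int(ukaz); none (ValueError) excluded by Pre_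
    if smer = 0 then (tab ++ [(x, y - n)], x, y - n, smer)
    else if smer = 1 then (tab ++ [(x + n, y)], x + n, y, smer)
    else if smer = 2 then (tab ++ [(x, y + n)], x, y + n, smer)
    else (tab ++ [(x - n, y)], x - n, y, smer)

def preberi_pot (ukazi : String) : List (Int × Int) :=
  (((PySem.Str.split? ukazi "\n").getD []).foldl stepA ([(0, 0)], 0, 0, 0)).1

-- ===== PORT B =====
def DIRS : List (Int × Int) := [(0, -1), (1, 0), (0, 1), (-1, 0)]

-- stage 1 state: (deltas, h)
def stepDelta (st : List (Int × Int) × Int) (vrstica : String) : List (Int × Int) × Int :=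
  let (deltas, h) := st
  if vrstica = "DESNO" then (deltas, h + 1)
  else if vrstica = "LEVO" then (deltas, h - 1)
  else
    let d := (PySem.List.pyGet? DIRS (PySem.Int.mod h 4)).getD (0, 0)   -- DIRS[h % 4]; always in range
    let n := (PySem.Int.ofStr? vrstica).getD 0   -- int(vrstica); none (ValueError) excluded by Pre_
    (deltas ++ [(d.1 * n, d.2 * n)], h)

-- stage 2: prefix sum
def stepSum (pot : List (Int × Int)) (d : Int × Int) : List (Int × Int) :=
  let p := (PySem.List.pyGet? pot (-1)).getD (0, 0)   -- pot[-1]; pot is never empty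
  pot ++ [(p.1 + d.1, p.2 + d.2)]

def preberi_pot_alt (ukazi : String) : List (Int × Int) :=
  let deltas := (((PySem.Str.split? ukazi "\n").getD []).foldl stepDelta ([], 0)).1
  deltas.foldl stepSum [(0, 0)]

-- ===== PRECONDITION & SPEC =====
-- Pre_ excludes exactly the inputs on which Python A raises ValueError: a line that is
-- neither of the two turn commands and not a valid int() literal.
def Pre_preberi_pot (ukazi : String) : Prop :=
  ∀ v ∈ (PySem.Str.split? ukazi "\n").getD [],
    v = "DESNO" ∨ v = "LEVO" ∨ (PySem.Int.ofStr? v).isSome = true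
instance (ukazi : String) : Decidable (Pre_preberi_pot ukazi) := by unfold Pre_preberi_pot; infer_instance

def pvWitness_preberi_pot : String := "3\nDESNO\n2\nLEVO\nLEVO\n4"

def Spec_preberi_pot (ukazi : String) (out : List (Int × Int)) : Prop := out = preberi_pot_alt ukazi
instance (ukazi : String) (out : List (Int × Int)) : Decidable (Spec_preberi_pot ukazi out) := by unfold Spec_preberi_pot; infer_instance

-- ===== CLAIM (what is proved, stated in full; the proofs are below) =====
def Claim_equal_preberi_pot : Prop := ∀ (ukazi : String), Dom_preberi_pot ukazi → Pre_preberi_pot ukazi → Spec_preberi_pot ukazi (preberi_pot ukazi)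

-- ===== LEMMAS AND PROOFS =====

/-- Stage 1 only ever appends to `deltas`: the accumulator factors out. -/
lemma stepDelta_factor (lines : List String) (acc : List (Int × Int)) (h : Int) :
    (lines.foldl stepDelta (acc, h)).1 = acc ++ (lines.foldl stepDelta ([], h)).1 := by
  induction lines generalizing acc h with
  | nil => simp
  | cons v rest ih =>
    simp only [List.foldl]
    by_cases hD : v = "DESNO"
    · rw [show stepDelta (acc, h) v = (acc, h + 1) by simp [stepDelta, hD],
          show stepDelta (([] : List (Int × Int)), h) v = ([], h + 1) by simp [stepDelta, hD]]
      exact ih acc (h + 1)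
    · by_cases hL : v = "LEVO"
      · rw [show stepDelta (acc, h) v = (acc, h - 1) by simp [stepDelta, hL],
            show stepDelta (([] : List (Int × Int)), h) v = ([], h - 1) by simp [stepDelta, hL]]
        exact ih acc (h - 1)
      · generalize hd : (((PySem.List.pyGet? DIRS (h % 4)).getD (0, 0)).1 * (PySem.Int.ofStr? v).getD 0,
            ((PySem.List.pyGet? DIRS (h % 4)).getD (0, 0)).2 * (PySem.Int.ofStr? v).getD 0) = D
        rw [show stepDelta (acc, h) v = (acc ++ [D], h) by simp [stepDelta, hD, hL, hd],
            show stepDelta (([] : List (Int × Int)), h) v = ([] ++ [D], h) by simp [stepDelta, hD, hL, hd]]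
        rw [ih (acc ++ [D]) h, ih ([] ++ [D]) h]
        simp

/-- Stage 2 over a cons of deltas. -/
lemma foldl_stepSum_cons (d : Int × Int) (ds : List (Int × Int)) (pot : List (Int × Int)) :
    (d :: ds).foldl stepSum pot = ds.foldl stepSum (stepSum pot d) := rfl

/-- One move-line case of the main induction, for a concrete heading value `m`. -/
lemma move_case (rest : List String) (tab : List (Int × Int)) (x y sA hB n : Int)
    (ih : ∀ (tab : List (Int × Int)) (x y sA hB : Int),
      PySem.Int.mod sA 4 = PySem.Int.mod hB 4 →
      PySem.List.pyGet? tab (-1) = some (x, y) →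
      (rest.foldl stepA (tab, x, y, sA)).1 =
        ((rest.foldl stepDelta ([], hB)).1).foldl stepSum tab)
    (hmod : PySem.Int.mod sA 4 = PySem.Int.mod hB 4)
    (hlast : PySem.List.pyGet? tab (-1) = some (x, y))
    (m d1 d2 x' y' : Int)
    (hv : PySem.Int.mod sA 4 = m)
    (hd : (PySem.List.pyGet? DIRS m).getD (0, 0) = (d1, d2))
    (hx : x' = x + d1 * n) (hy : y' = y + d2 * n)
    (hm4 : PySem.Int.mod m 4 = m) :
    (rest.foldl stepA (tab ++ [(x', y')], x', y', m)).1 =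
      ((rest.foldl stepDelta ([(((PySem.List.pyGet? DIRS m).getD (0, 0)).1 * n,
          ((PySem.List.pyGet? DIRS m).getD (0, 0)).2 * n)], hB)).1).foldl stepSum tab := by
  have hB4 : PySem.Int.mod hB 4 = m := hmod.symm.trans hv
  rw [stepDelta_factor, List.singleton_append, foldl_stepSum_cons]
  rw [hd]
  have hs : stepSum tab (d1 * n, d2 * n) = tab ++ [(x', y')] := by
    simp [stepSum, hlast, hx, hy]
  rw [hs]
  exact ih _ _ _ _ _ (by rw [hm4, hB4]) (PySem.List.pyGet?_neg_one_append_singleton tab (x', y'))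

/-- Main invariant: A's fold equals stage-2 prefix-summing of stage-1's deltas,
    whenever the two heading states agree mod 4 and (x, y) is the last point of tab. -/
lemma loopAB (lines : List String) (tab : List (Int × Int)) (x y sA hB : Int)
    (hmod : PySem.Int.mod sA 4 = PySem.Int.mod hB 4)
    (hlast : PySem.List.pyGet? tab (-1) = some (x, y)) :
    (lines.foldl stepA (tab, x, y, sA)).1 =
      ((lines.foldl stepDelta ([], hB)).1).foldl stepSum tab := by
  induction lines generalizing tab x y sA hB with
  | nil => simp
  | cons v rest ih =>
    have e4 : ∀ a : Int, PySem.Int.mod a 4 = a % 4 :=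
      fun a => PySem.Int.mod_eq_emod_of_pos (by norm_num)
    simp only [List.foldl, stepA, stepDelta]
    by_cases hD : v = "DESNO"
    · simp only [hD, reduceIte]
      exact ih _ _ _ _ _ (by simp only [e4] at hmod ⊢; omega) hlast
    · by_cases hL : v = "LEVO"
      · simp only [hL, reduceIte]
        exact ih _ _ _ _ _ (by simp only [e4] at hmod ⊢; omega) hlast
      · simp only [hD, hL, reduceIte]
        rw [hmod]
        have hc : PySem.Int.mod sA 4 = 0 ∨ PySem.Int.mod sA 4 = 1 ∨
            PySem.Int.mod sA 4 = 2 ∨ PySem.Int.mod sA 4 = 3 := by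
          simp only [e4]; omega
        set n := (PySem.Int.ofStr? v).getD 0 with hn
        rcases hc with hv | hv | hv | hv <;> rw [hmod] at hv <;> rw [hv] <;>
          norm_num <;>
          [ exact move_case rest tab x y sA hB n ih hmod hlast 0 0 (-1) x (y - n) (hmod.trans hv)
              (by decide) (by ring) (by ring) (by decide);
            exact move_case rest tab x y sA hB n ih hmod hlast 1 1 0 (x + n) y (hmod.trans hv)
              (by decide) (by ring) (by ring) (by decide);
            exact move_case rest tab x y sA hB n ih hmod hlast 2 0 1 x (y + n) (hmod.trans hv)
              (by decide) (by ring) (by ring) (by decide);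
            exact move_case rest tab x y sA hB n ih hmod hlast 3 (-1) 0 (x - n) y (hmod.trans hv)
              (by decide) (by ring) (by ring) (by decide) ]

-- ===== VERDICT (by name: the statement is the Claim_ definition above) =====
theorem preberi_pot_spec : Claim_equal_preberi_pot := by
  intro ukazi _ _
  unfold Spec_preberi_pot preberi_pot preberi_pot_alt
  exact loopAB _ _ _ _ _ _ rfl (by decide)
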